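-- pv_equiv track=rewrite | github.com/dannymeijer/level-up-with-python | Next Level/Three Words/mission.py | has_three_words
-- ===== SOURCE A (Python) =====
-- def has_three_words(words: str) -> bool:
--     bag_o_words, counter = words.split(), 0
--     for word in bag_o_words:
--         counter = 0 if not word.isalpha() else counter + 1
--         if counter == 3:
--             return True
--     else:
--         return False
-- ===== SOURCE B (Python) =====
-- def has_three_words(words: str) -> bool:
--     # Two-level scan: locate each maximal run of alphabetic words and
--     # measure its length directly, instead of a running counter.
--     ws = words.split()
--     i = 0
--     while i < len(ws):
--         if ws[i].isalpha():
--             j = i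
--             while j < len(ws) and ws[j].isalpha():
--                 j += 1
--             if j - i >= 3:
--                 return True
--             i = j
--         else:
--             i += 1
--     return False
-- ===== Notes on version B (the rewrite author's own statement) =====
-- stated objective: alternative
-- what changed: Replaces A's running counter with a two-level scan that finds each maximal run of alphabetic words and checks its length directly.
import Mathlib
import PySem

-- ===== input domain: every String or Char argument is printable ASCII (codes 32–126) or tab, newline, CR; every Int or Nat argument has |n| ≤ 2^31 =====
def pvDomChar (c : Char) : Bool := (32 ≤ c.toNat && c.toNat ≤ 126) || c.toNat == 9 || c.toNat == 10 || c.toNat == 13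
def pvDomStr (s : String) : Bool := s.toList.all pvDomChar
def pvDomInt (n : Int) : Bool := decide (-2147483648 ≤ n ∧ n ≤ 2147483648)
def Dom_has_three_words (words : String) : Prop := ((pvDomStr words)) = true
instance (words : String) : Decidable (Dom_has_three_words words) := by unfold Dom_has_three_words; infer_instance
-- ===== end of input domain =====

-- B replaces A's running counter with a two-level scan over maximal alphabetic runs; alternative decomposition, same cost.


-- ===== PORT A =====
-- A's for-loop with the running counter and the early `return True`.
def pvLoopA : List String → Nat → Bool
  | [], _ => false
  | w :: ws, counter =>
    let counter' := if !(PySem.Str.strIsalpha w) then 0 else counter + 1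
    if counter' = 3 then true else pvLoopA ws counter'

def has_three_words (words : String) : Bool :=
  pvLoopA (PySem.Str.split₀ words) 0

-- ===== PORT B =====
-- B's outer while-loop; the inner `while j ...` counting loop is the takeWhile
-- prefix length, and `i = j` resumes at the corresponding dropWhile suffix (exact).
def pvScanB : List String → Bool
  | [] => false
  | w :: t =>
    if PySem.Str.strIsalpha w then
      if 3 ≤ 1 + (t.takeWhile PySem.Str.strIsalpha).length then true
      else pvScanB (t.dropWhile PySem.Str.strIsalpha)
    else pvScanB t
termination_by ws => ws.length
decreasing_by
  · exact Nat.lt_succ_of_le (List.length_dropWhile_le _ _)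
  · exact Nat.lt_succ_self _

def has_three_words_alt (words : String) : Bool :=
  pvScanB (PySem.Str.split₀ words)

-- ===== PRECONDITION & SPEC =====
def Spec_has_three_words (words : String) (out : Bool) : Prop := out = has_three_words_alt words
instance (words : String) (out : Bool) : Decidable (Spec_has_three_words words out) := by unfold Spec_has_three_words; infer_instance

-- ===== CLAIM (what is proved, stated in full; the proofs are below) =====
def Claim_equal_has_three_words : Prop := ∀ (words : String), Dom_has_three_words words → Spec_has_three_words words (has_three_words words)

-- ===== LEMMAS AND PROOFS =====

-- A's loop from counter c (< 3): it returns true iff the leading alphabetic run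
-- completes the count to 3, else it continues past that run with counter 0.
theorem pvLoopA_run (t : List String) : ∀ c : Nat, c < 3 →
    pvLoopA t c =
      (if 3 ≤ c + (t.takeWhile PySem.Str.strIsalpha).length then true
       else pvLoopA (t.dropWhile PySem.Str.strIsalpha) 0) := by
  induction t with
  | nil =>
    intro c hc
    simp only [List.takeWhile_nil, List.dropWhile_nil, List.length_nil]
    rw [if_neg (by omega)]
    rfl
  | cons w t ih =>
    intro c hc
    by_cases hw : PySem.Str.strIsalpha w = true
    · rw [List.takeWhile_cons_of_pos hw, List.dropWhile_cons_of_pos hw, List.length_cons, pvLoopA]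
      simp only [hw, Bool.not_true, Bool.false_eq_true, if_false]
      by_cases h3 : c + 1 = 3
      · rw [if_pos h3, if_pos (by omega)]
      · rw [if_neg h3, ih (c + 1) (by omega)]
        by_cases hl : 3 ≤ c + 1 + (List.takeWhile PySem.Str.strIsalpha t).length
        · rw [if_pos hl, if_pos (by omega)]
        · rw [if_neg hl, if_neg (by omega)]
    · have hw' : PySem.Str.strIsalpha w = false := by
        cases h : PySem.Str.strIsalpha w
        · rfl
        · exact absurd h hw
      rw [List.takeWhile_cons_of_neg (by simpa using hw'), List.dropWhile_cons_of_neg (by simpa using hw'),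
        List.length_nil, pvLoopA]
      simp only [hw', Bool.not_false, if_true]
      rw [if_neg (by omega : ¬ (0 = 3)), if_neg (by omega : ¬ 3 ≤ c + 0), pvLoopA]
      simp only [hw', Bool.not_false, if_true]
      rw [if_neg (by omega : ¬ (0 = 3))]

-- A's loop started at 0 equals B's run scan.
theorem pvLoopA_eq_pvScanB (ws : List String) : pvLoopA ws 0 = pvScanB ws := by
  induction ws using pvScanB.induct with
  | case1 => simp [pvLoopA, pvScanB]
  | case2 w t hw h3 =>
    rw [pvScanB, if_pos hw, if_pos h3, pvLoopA]
    simp only [hw, Bool.not_true, Bool.false_eq_true, if_false]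
    rw [if_neg (by omega : ¬ (0 + 1 = 3)), pvLoopA_run t 1 (by omega), if_pos (by omega)]
  | case3 w t hw h3 ih =>
    rw [pvScanB, if_pos hw, if_neg h3, ← ih, pvLoopA]
    simp only [hw, Bool.not_true, Bool.false_eq_true, if_false]
    rw [if_neg (by omega : ¬ (0 + 1 = 3)), pvLoopA_run t 1 (by omega), if_neg (by omega)]
  | case4 w t hw ih =>
    have hw' : PySem.Str.strIsalpha w = false := by
      cases h : PySem.Str.strIsalpha w
      · rfl
      · exact absurd h hw
    rw [pvScanB, if_neg hw, ← ih, pvLoopA]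
    simp only [hw', Bool.not_false, if_true]
    rw [if_neg (by omega : ¬ (0 = 3))]

-- ===== VERDICT (by name: the statement is the Claim_ definition above) =====
theorem has_three_words_spec : Claim_equal_has_three_words := by
  intro words _
  unfold Spec_has_three_words has_three_words has_three_words_alt
  exact pvLoopA_eq_pvScanB _
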